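-- pv_equiv track=rewrite | github.com/hao14chasing/CS61A | Homework/hw04/hw04.py | remove_odd_indices
-- ===== SOURCE A (Python) =====
-- def remove_odd_indices(lst, odd):
--     """Remove elements of lst that have odd indices. Use recursion!
--
--     >>> s = [1, 2, 3, 4]
--     >>> t = remove_odd_indices(s, True)
--     >>> s
--     [1, 2, 3, 4]
--     >>> t
--     [1, 3]
--     >>> l = [5, 6, 7, 8]
--     >>> m = remove_odd_indices(l, False)
--     >>> m
--     [6, 8]
--     >>> remove_odd_indices([9, 8, 7, 6, 5, 4, 3], False)
--     [8, 6, 4]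
--     >>> remove_odd_indices([2], False)
--     []
--     >>> # Do not use while/for loops!
--     >>> from construct_check import check
--     >>> # ban iteration
--     >>> check(HW_SOURCE_FILE, 'remove_odd_indices',
--     ...       ['While', 'For'])
--     True
--     """
--     "*** YOUR CODE HERE ***"
--     new=[]
--     if lst==[]:
--         return new
--     if len(lst)==1:
--         return new
--     if odd==True:
--         new=[lst[0]]+remove_odd_indices(lst[2:],True)
--     if odd==False:
--         new=[lst[1]]+remove_odd_indices(lst[2:],False)
--     return new
-- ===== SOURCE B (Python) =====
-- def remove_odd_indices(lst, odd):
--     # One pass: truncate to even length (this drops any unpaired trailing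
--     # element, as A does), then keep the indices of the chosen parity.
--     keep = 0 if odd else 1
--     n = len(lst) - len(lst) % 2
--     return [x for i, x in enumerate(lst[:n]) if i % 2 == keep]
-- ===== Notes on version B (the rewrite author's own statement) =====
-- stated objective: faster
-- what changed: Replaces A's two-at-a-time recursion (which rebuilds lst[2:] slices and concatenates singleton lists at every step) with a single list comprehension over enumerate of the list truncated to even length, selecting by index parity; the truncation reproduces A's drop of an unpaired trailing element.
import Mathlib
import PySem

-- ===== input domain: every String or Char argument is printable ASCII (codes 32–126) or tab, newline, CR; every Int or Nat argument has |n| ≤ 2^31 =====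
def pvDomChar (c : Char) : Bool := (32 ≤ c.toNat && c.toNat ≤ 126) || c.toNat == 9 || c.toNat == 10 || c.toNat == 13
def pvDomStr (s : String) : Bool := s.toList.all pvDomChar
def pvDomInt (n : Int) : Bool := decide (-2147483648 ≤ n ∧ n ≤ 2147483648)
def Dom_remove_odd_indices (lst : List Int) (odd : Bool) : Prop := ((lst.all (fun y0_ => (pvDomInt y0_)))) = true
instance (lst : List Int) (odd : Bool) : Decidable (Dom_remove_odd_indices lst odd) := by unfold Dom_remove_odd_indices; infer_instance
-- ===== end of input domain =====

-- ===== PORT A =====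
-- B truncates lst to even length then filters by index parity in one pass,
-- instead of A's two-at-a-time recursion; return value equivalence only.
def remove_odd_indices (lst : List Int) (odd : Bool) : List Int :=
  -- new = []; if lst == []: return new; if len(lst) == 1: return new
  match lst with
  | [] => []
  | [_] => []
  | a :: b :: rest =>
      -- lst[0] = a, lst[1] = b, lst[2:] = rest
      if odd = true then [a] ++ remove_odd_indices rest true
      else [b] ++ remove_odd_indices rest false

-- ===== PORT B =====
def remove_odd_indices_alt (lst : List Int) (odd : Bool) : List Int :=
  let keep : Int := if odd then 0 else 1
  let n : Int := (lst.length : Int) - (lst.length : Int) % 2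
  ((PySem.List.enumerate (PySem.List.slice lst none (some n)) 0).filter
      (fun p => p.1 % 2 == keep)).map (·.2)

-- ===== PRECONDITION & SPEC =====
def Spec_remove_odd_indices (lst : List Int) (odd : Bool) (out : List Int) : Prop := out = remove_odd_indices_alt lst odd
instance (lst : List Int) (odd : Bool) (out : List Int) : Decidable (Spec_remove_odd_indices lst odd out) := by unfold Spec_remove_odd_indices; infer_instance

-- ===== CLAIM (what is proved, stated in full; the proofs are below) =====
def Claim_equal_remove_odd_indices : Prop := ∀ (lst : List Int) (odd : Bool), Dom_remove_odd_indices lst odd → Spec_remove_odd_indices lst odd (remove_odd_indices lst odd)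

-- ===== LEMMAS AND PROOFS =====

-- Shifting every index by 2 does not change which entries a parity filter keeps.
lemma filt_shift (xs : List Int) (s keep : Int) :
    ((PySem.List.enumerate xs (s + 2)).filter (fun p => p.1 % 2 == keep)).map (·.2)
      = ((PySem.List.enumerate xs s).filter (fun p => p.1 % 2 == keep)).map (·.2) := by
  induction xs generalizing s with
  | nil => simp [PySem.List.enumerate_nil]
  | cons x xs ih =>
    have h : (s + 2) % 2 = s % 2 := by omega
    have h3 : s + 2 + 1 = (s + 1) + 2 := by ring
    simp only [PySem.List.enumerate_cons, List.filter_cons, h, h3]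
    split <;> simp [ih (s + 1)]

lemma alt_eval (lst : List Int) (odd : Bool) :
    remove_odd_indices_alt lst odd
      = ((PySem.List.enumerate (lst.take (lst.length - lst.length % 2)) 0).filter
          (fun p => p.1 % 2 == (if odd then (0 : Int) else 1))).map (·.2) := by
  have hn : (0 : Int) ≤ (lst.length : Int) - (lst.length : Int) % 2 := by omega
  have ht : ((lst.length : Int) - (lst.length : Int) % 2).toNat = lst.length - lst.length % 2 := by
    omega
  unfold remove_odd_indices_alt
  simp only [PySem.List.slice_to lst hn, ht]

lemma take_even_cons (a b : Int) (rest : List Int) :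
    (a :: b :: rest).take ((a :: b :: rest).length - (a :: b :: rest).length % 2)
      = a :: b :: rest.take (rest.length - rest.length % 2) := by
  have h : (a :: b :: rest).length - (a :: b :: rest).length % 2
      = (rest.length - rest.length % 2) + 2 := by simp; omega
  rw [h]; rfl

lemma filt_shift2 (xs : List Int) (keep : Int) :
    ((PySem.List.enumerate xs 2).filter (fun p => p.1 % 2 == keep)).map (·.2)
      = ((PySem.List.enumerate xs 0).filter (fun p => p.1 % 2 == keep)).map (·.2) := by
  simpa using filt_shift xs 0 keep

theorem main_eq (lst : List Int) (odd : Bool) :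
    remove_odd_indices lst odd = remove_odd_indices_alt lst odd := by
  induction lst, odd using remove_odd_indices.induct with
  | case1 odd => cases odd <;> simp [remove_odd_indices, alt_eval, PySem.List.enumerate_nil]
  | case2 odd x => cases odd <;> simp [remove_odd_indices, alt_eval, PySem.List.enumerate_nil]
  | case3 a b rest ih =>
    rw [remove_odd_indices, alt_eval, take_even_cons a b rest]
    simp only [PySem.List.enumerate_cons, List.filter_cons]
    norm_num
    rw [filt_shift2, ih, alt_eval]
    simp
  | case4 odd a b rest h ih =>
    have ho : odd = false := by simpa using h
    subst ho
    rw [remove_odd_indices, alt_eval, take_even_cons a b rest]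
    simp only [PySem.List.enumerate_cons, List.filter_cons]
    norm_num
    rw [filt_shift2, ih, alt_eval]
    simp

-- ===== VERDICT (by name: the statement is the Claim_ definition above) =====
theorem remove_odd_indices_spec : Claim_equal_remove_odd_indices := by
  intro lst odd _
  unfold Spec_remove_odd_indices
  exact main_eq lst odd
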